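-- pv_equiv track=rewrite | github.com/FernanOrtega/Seichi-candidates-ranking | candidates_creator.py | candidates_of_sentence
-- ===== SOURCE A (Python) =====
-- def flat_sent(sub_sequence):
--     return [token for block in sub_sequence for token in block]
--
-- def candidates_of_sentence(blocks):
--     candidates = []
--     for i, item in enumerate(blocks):
--         for j in range(i + 1, len(blocks) + 1):
--             condition = flat_sent(blocks[i:j])
--             if len(condition) > 1:
--                 candidates.append([flat_sent(blocks[:i])] + [condition] + [flat_sent(blocks[j:])])
--
--     return candidates
-- ===== SOURCE B (Python) =====
-- def candidates_of_sentence(blocks):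
--     n = len(blocks)
--     # suffix[j] == flattened blocks[j:], built back-to-front once
--     suffix = [[]]
--     for b in reversed(blocks):
--         suffix.append(b + suffix[-1])
--     suffix.reverse()
--     candidates = []
--     prefix = []
--     for i, blk in enumerate(blocks):
--         condition = []
--         for j in range(i + 1, n + 1):
--             condition = condition + blocks[j - 1]
--             if len(condition) > 1:
--                 candidates.append([prefix, condition, suffix[j]])
--         prefix = prefix + blk
--     return candidates
-- ===== Notes on version B (the rewrite author's own statement) =====
-- stated objective: alternative
-- what changed: B precomputes all suffix flattenings once back-to-front and grows the prefix and the condition incrementally, reusing references, instead of re-flattening the three slices blocks[:i], blocks[i:j], blocks[j:] from scratch for every (i,j) pair.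
import Mathlib
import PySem

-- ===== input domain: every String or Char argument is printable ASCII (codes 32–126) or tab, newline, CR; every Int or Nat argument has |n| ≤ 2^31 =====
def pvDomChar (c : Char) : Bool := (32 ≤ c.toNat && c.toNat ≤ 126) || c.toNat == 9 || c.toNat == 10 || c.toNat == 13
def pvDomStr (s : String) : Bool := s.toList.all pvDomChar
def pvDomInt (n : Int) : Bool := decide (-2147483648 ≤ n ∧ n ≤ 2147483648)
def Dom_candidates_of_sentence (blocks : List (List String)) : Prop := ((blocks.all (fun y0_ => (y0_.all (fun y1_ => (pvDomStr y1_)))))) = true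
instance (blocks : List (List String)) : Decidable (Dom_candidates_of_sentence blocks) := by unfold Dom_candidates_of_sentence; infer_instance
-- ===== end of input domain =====

-- B precomputes suffix flats once and builds prefix/condition incrementally instead of
-- reflattening three slices per (i,j) pair; objective: alternative (different traversal, same result).


-- ===== PORT A =====
-- [token for block in sub_sequence for token in block]
def flatSent (sub_sequence : List (List String)) : List String :=
  sub_sequence.flatMap (fun block => block)

-- nested for-loops with list slices, exactly as in A
def candidates_of_sentence (blocks : List (List String)) : List (List (List String)) :=
  (List.range blocks.length).foldl (fun candidates i =>
    (List.range' (i + 1) (blocks.length + 1 - (i + 1))).foldl (fun candidates j =>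
      let condition := flatSent ((blocks.drop i).take (j - i))
      if condition.length > 1 then
        candidates ++ [[flatSent (blocks.take i), condition, flatSent (blocks.drop j)]]
      else candidates) candidates) []

-- ===== PORT B =====
-- suffix flats built back-to-front: suffFlats bs = [flat bs, flat bs.tail, …, []]
def suffFlats : List (List String) → List (List String)
  | [] => [[]]
  | b :: rest => (b ++ (suffFlats rest).headD []) :: suffFlats rest

-- inner j-loop: condition grows incrementally, suffix read off the precomputed list
def goInner (pref cond : List String) :
    List (List String) → List (List String) → List (List (List String))
  | [], _ => []
  | b :: rest, sfx =>
    let cond' := cond ++ b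
    let sfx' := sfx.tail
    (if cond'.length > 1 then [[pref, cond', sfx'.headD []]] else []) ++
      goInner pref cond' rest sfx'

-- outer i-loop: prefix grows incrementally
def goOuter (pref : List String) :
    List (List String) → List (List String) → List (List (List String))
  | [], _ => []
  | b :: rest, sfx => goInner pref [] (b :: rest) sfx ++ goOuter (pref ++ b) rest sfx.tail

def candidates_of_sentence_alt (blocks : List (List String)) : List (List (List String)) :=
  goOuter [] blocks (suffFlats blocks)

-- ===== PRECONDITION & SPEC =====
def Spec_candidates_of_sentence (blocks : List (List String)) (out : List (List (List String))) : Prop := out = candidates_of_sentence_alt blocks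
instance (blocks : List (List String)) (out : List (List (List String))) : Decidable (Spec_candidates_of_sentence blocks out) := by unfold Spec_candidates_of_sentence; infer_instance

-- ===== CLAIM (what is proved, stated in full; the proofs are below) =====
def Claim_equal_candidates_of_sentence : Prop := ∀ (blocks : List (List String)), Dom_candidates_of_sentence blocks → Spec_candidates_of_sentence blocks (candidates_of_sentence blocks)

-- ===== LEMMAS AND PROOFS =====

-- common reference form: the inner loop for one fixed i, as a flatMap over k = j-i-1
def innerSpec (pref : List String) (bs : List (List String)) : List (List (List String)) :=
  (List.range bs.length).flatMap (fun k =>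
    let c := flatSent (bs.take (k + 1))
    if c.length > 1 then [[pref, c, flatSent (bs.drop (k + 1))]] else [])

theorem foldl_if_append {α β : Type} (p : α → Prop) [DecidablePred p] (g : α → β)
    (l : List α) (a : List β) :
    l.foldl (fun acc x => if p x then acc ++ [g x] else acc) a
      = a ++ l.flatMap (fun x => if p x then [g x] else []) := by
  induction l generalizing a with
  | nil => simp
  | cons x xs ih =>
    simp only [List.foldl_cons, List.flatMap_cons]
    by_cases h : p x <;> simp [h, ih, List.append_assoc]

theorem foldl_append_flatMap {α β : Type} (f : α → List β) (l : List α) (a : List β) :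
    l.foldl (fun acc x => acc ++ f x) a = a ++ l.flatMap f := by
  induction l generalizing a with
  | nil => simp
  | cons x xs ih => simp [ih, List.append_assoc]

theorem suffFlats_head (bs : List (List String)) :
    (suffFlats bs).head?.getD [] = bs.flatten := by
  induction bs with
  | nil => simp [suffFlats]
  | cons b rest ih => simp [suffFlats, ih]

theorem suffFlats_tail (b : List String) (rest : List (List String)) :
    (suffFlats (b :: rest)).tail = suffFlats rest := rfl

theorem goInner_eq (pref : List String) (bs : List (List String)) (cond : List String) :
    goInner pref cond bs (suffFlats bs)
      = (List.range bs.length).flatMap (fun k =>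
          let c := cond ++ flatSent (bs.take (k + 1))
          if c.length > 1 then [[pref, c, flatSent (bs.drop (k + 1))]] else []) := by
  induction bs generalizing cond with
  | nil => simp [goInner]
  | cons b rest ih =>
    simp only [goInner, suffFlats_tail]
    rw [ih]
    simp only [List.length_cons, List.range_succ_eq_map, List.flatMap_cons, List.flatMap_map]
    congr 1
    · simp [suffFlats_head, flatSent]
    · apply List.flatMap_congr
      intro k _
      simp [flatSent, List.append_assoc]

theorem goOuter_eq (pref : List String) (bs : List (List String)) :
    goOuter pref bs (suffFlats bs)
      = (List.range bs.length).flatMap (fun i =>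
          innerSpec (pref ++ flatSent (bs.take i)) (bs.drop i)) := by
  induction bs generalizing pref with
  | nil => simp [goOuter]
  | cons b rest ih =>
    simp only [goOuter, suffFlats_tail]
    rw [goInner_eq, ih]
    simp only [List.length_cons, List.range_succ_eq_map, List.flatMap_cons, List.flatMap_map]
    congr 1
    · simp [innerSpec, flatSent, List.range_succ_eq_map, List.flatMap_map]
    · apply List.flatMap_congr
      intro i _
      simp [innerSpec, flatSent, List.append_assoc]

theorem A_eq_spec (blocks : List (List String)) :
    candidates_of_sentence blocks
      = (List.range blocks.length).flatMap (fun i =>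
          innerSpec (flatSent (blocks.take i)) (blocks.drop i)) := by
  unfold candidates_of_sentence
  have hfun : (fun (candidates : List (List (List String))) (i : Nat) =>
      (List.range' (i + 1) (blocks.length + 1 - (i + 1))).foldl (fun candidates j =>
        let condition := flatSent ((blocks.drop i).take (j - i))
        if condition.length > 1 then
          candidates ++ [[flatSent (blocks.take i), condition, flatSent (blocks.drop j)]]
        else candidates) candidates)
      = fun candidates i => candidates ++ innerSpec (flatSent (blocks.take i)) (blocks.drop i) := by
    funext a i
    rw [show (fun (candidates : List (List (List String))) (j : Nat) =>
        let condition := flatSent ((blocks.drop i).take (j - i))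
        if condition.length > 1 then
          candidates ++ [[flatSent (blocks.take i), condition, flatSent (blocks.drop j)]]
        else candidates)
      = fun candidates j =>
        if (flatSent ((blocks.drop i).take (j - i))).length > 1 then
          candidates ++ [[flatSent (blocks.take i), flatSent ((blocks.drop i).take (j - i)),
            flatSent (blocks.drop j)]]
        else candidates from rfl]
    rw [foldl_if_append (fun j => (flatSent ((blocks.drop i).take (j - i))).length > 1)
      (fun j => [flatSent (blocks.take i), flatSent ((blocks.drop i).take (j - i)),
        flatSent (blocks.drop j)])]
    congr 1
    unfold innerSpec
    rw [List.range'_eq_map_range, List.flatMap_map]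
    rcases Nat.lt_or_ge i blocks.length with hi | hi
    · have hlen : blocks.length + 1 - (i + 1) = blocks.length - i := by omega
      rw [hlen]
      have hdl : (blocks.drop i).length = blocks.length - i := by simp
      rw [hdl]
      apply List.flatMap_congr
      intro k hk
      have h1 : i + 1 + k - i = k + 1 := by omega
      have h2 : blocks.drop (i + 1 + k) = (blocks.drop i).drop (k + 1) := by
        rw [List.drop_drop]; congr 1; omega
      simp only [h1, h2]
    · have h0 : blocks.length + 1 - (i + 1) = 0 := by omega
      have h2 : (blocks.drop i).length = 0 := by simp; omega
      simp [h0, h2]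
  rw [hfun, foldl_append_flatMap]
  simp

-- ===== VERDICT (by name: the statement is the Claim_ definition above) =====
theorem candidates_of_sentence_spec : Claim_equal_candidates_of_sentence := by
  intro blocks _
  unfold Spec_candidates_of_sentence candidates_of_sentence_alt
  rw [goOuter_eq, A_eq_spec]
  apply List.flatMap_congr
  intro i _
  simp
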